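-- pv_equiv track=rewrite | github.com/Tinny-Robot/Hacktoberfest2023-DSA | 02. Bit Magic/bit-magic.py | find_ranges_with_set_bit_sum
-- ===== SOURCE A (Python) =====
-- def count_set_bits(num):
--     # Function to count the number of set bits in a binary representation of num
--     count = 0
--     while num:
--         count += num & 1
--         num >>= 1
--     return count
--
-- def find_ranges_with_set_bit_sum(arr, X):
--     n = len(arr)
--     prefix_set_bits = [0] * (n + 1)
--
--     # Calculate the prefix sum of set bits in the array
--     for i in range(1, n + 1):
--         prefix_set_bits[i] = prefix_set_bits[i - 1] + count_set_bits(arr[i - 1])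
--
--     # Create a dictionary to store the starting index of each prefix sum
--     index_dict = {}
--     ranges = []
--
--     for i in range(n + 1):
--         prefix_sum = prefix_set_bits[i]
--         if prefix_sum - X in index_dict:
--             for start in index_dict[prefix_sum - X]:
--                 ranges.append((start, i - 1))
--         if prefix_sum not in index_dict:
--             index_dict[prefix_sum] = [i]
--         else:
--             index_dict[prefix_sum].append(i)
--
--     return ranges
-- ===== SOURCE B (Python) =====
-- def count_set_bits(num):
--     # Function to count the number of set bits in a binary representation of num
--     count = 0
--     while num:
--         count += num & 1
--         num >>= 1
--     return count
--
-- def find_ranges_with_set_bit_sum(arr, X):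
--     # Brute-force: prefix sums once, then scan all (start, end) pairs,
--     # end-outer / start-ascending (matches A's dict-based output order).
--     prefix = [0]
--     for b in (count_set_bits(x) for x in arr):
--         prefix.append(prefix[-1] + b)
--     return [(s, e)
--             for e in range(len(arr))
--             for s in range(e + 1)
--             if prefix[e + 1] - prefix[s] == X]
-- ===== Notes on version B (the rewrite author's own statement) =====
-- stated objective: alternative
-- what changed: Replaces A's prefix-sum + hash-map-of-start-index-lists single pass with a brute-force nested scan over all (start, end) pairs against a plain prefix-sum list, emitted end-outer/start-ascending.
import Mathlib
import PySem

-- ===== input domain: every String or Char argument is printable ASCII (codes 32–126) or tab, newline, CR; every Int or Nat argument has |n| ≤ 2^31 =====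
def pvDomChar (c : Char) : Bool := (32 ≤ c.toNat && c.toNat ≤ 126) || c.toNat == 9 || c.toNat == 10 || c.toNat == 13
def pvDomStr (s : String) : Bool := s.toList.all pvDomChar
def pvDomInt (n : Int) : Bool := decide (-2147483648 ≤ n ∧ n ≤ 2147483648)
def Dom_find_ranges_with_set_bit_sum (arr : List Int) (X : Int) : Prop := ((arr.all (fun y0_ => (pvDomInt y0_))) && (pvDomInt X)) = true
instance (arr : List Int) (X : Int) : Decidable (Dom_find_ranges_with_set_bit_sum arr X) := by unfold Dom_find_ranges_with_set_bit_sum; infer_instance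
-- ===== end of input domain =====

-- B replaces A's prefix-sum + hash-map-of-start-lists scan with a brute-force
-- end-outer/start-ascending nested scan over a plain prefix-sum list (objective: alternative).

-- ===== PORT A =====
-- 'while num:' with 'num >>= 1'; for num < 0 the Python loop never terminates,
-- so the num ≤ 0 guard only makes the recursion total; exact wherever Python returns (num ≥ 0).
def count_set_bits (num : Int) : Int :=
  if _h : num ≤ 0 then 0
  else PySem.Int.band num 1 + count_set_bits (num >>> (1 : Nat))
termination_by num.toNat
decreasing_by rw [Int.shiftRight_eq_div_pow]; omega

def find_ranges_with_set_bit_sum (arr : List Int) (X : Int) : List (Int × Int) :=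
  let n : Int := PySem.List.len arr
  let prefix0 : List Int := PySem.List.pyRepeat [0] (n + 1)
  let ps : List Int := (PySem.List.pyRange 1 (n + 1) 1).foldl
    (fun ps i => PySem.List.pySetD ps i
        (PySem.List.pyGetD ps (i - 1) 0 + count_set_bits (PySem.List.pyGetD arr (i - 1) 0)))
    prefix0
  let st := (PySem.List.pyRange 0 (n + 1) 1).foldl
    (fun (st : PySem.Dict Int (List Int) × List (Int × Int)) i =>
      let prefix_sum := PySem.List.pyGetD ps i 0
      let ranges := if st.1.contains (prefix_sum - X)
        then st.2 ++ (st.1.getD (prefix_sum - X) []).map (fun start => (start, i - 1))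
        else st.2
      let d := if st.1.contains prefix_sum = false
        then st.1.insert prefix_sum [i]
        else st.1.modify prefix_sum [] (· ++ [i])
      (d, ranges))
    (PySem.Dict.empty, [])
  st.2

-- ===== PORT B =====
def find_ranges_with_set_bit_sum_alt (arr : List Int) (X : Int) : List (Int × Int) :=
  let pfx : List Int := (arr.map count_set_bits).foldl
    (fun p b => p ++ [PySem.List.pyGetD p (-1) 0 + b]) [0]
  (PySem.List.pyRange 0 (PySem.List.len arr) 1).flatMap (fun e =>
    ((PySem.List.pyRange 0 (e + 1) 1).filter
        (fun s => PySem.List.pyGetD pfx (e + 1) 0 - PySem.List.pyGetD pfx s 0 == X)).map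
      (fun s => (s, e)))

-- ===== PRECONDITION & SPEC =====
def Spec_find_ranges_with_set_bit_sum (arr : List Int) (X : Int) (out : List (Int × Int)) : Prop := out = find_ranges_with_set_bit_sum_alt arr X
instance (arr : List Int) (X : Int) (out : List (Int × Int)) : Decidable (Spec_find_ranges_with_set_bit_sum arr X out) := by unfold Spec_find_ranges_with_set_bit_sum; infer_instance

-- ===== CLAIM (what is proved, stated in full; the proofs are below) =====
def Claim_equal_find_ranges_with_set_bit_sum : Prop := ∀ (arr : List Int) (X : Int), Dom_find_ranges_with_set_bit_sum arr X → Spec_find_ranges_with_set_bit_sum arr X (find_ranges_with_set_bit_sum arr X)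

-- ===== LEMMAS AND PROOFS =====
def pvS (arr : List Int) (k : Nat) : Int := ((arr.take k).map count_set_bits).sum
lemma pvS_succ (arr : List Int) (k : Nat) (h : k < arr.length) :
    pvS arr (k + 1) = pvS arr k + count_set_bits arr[k] := by
  simp only [pvS, List.take_add_one, List.getElem?_eq_getElem h, Option.toList_some,
    List.map_append, List.map_cons, List.map_nil, List.sum_append, List.sum_cons,
    List.sum_nil, add_zero]
def pvP (arr : List Int) : List Int := (List.range (arr.length + 1)).map (pvS arr)

lemma psB_aux (arr : List Int) : ∀ (zs ys : List Int), ys ++ zs = arr →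
    (zs.map count_set_bits).foldl (fun p b => p ++ [PySem.List.pyGetD p (-1) 0 + b])
      ((List.range (ys.length + 1)).map (pvS arr))
    = pvP arr := by
  intro zs
  induction zs with
  | nil =>
    intro ys h
    simp only [List.append_nil] at h
    subst h; rfl
  | cons z zs ih =>
    intro ys h
    have hlen : ys.length < arr.length := by
      subst h; simp
    have hne : ((List.range (ys.length + 1)).map (pvS arr)) ≠ [] := by simp
    have hz : arr[ys.length] = z := by
      subst h; simp
    have hstep : ((List.range (ys.length + 1)).map (pvS arr)) ++
        [PySem.List.pyGetD ((List.range (ys.length + 1)).map (pvS arr)) (-1) 0 + count_set_bits z]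
        = (List.range ((ys ++ [z]).length + 1)).map (pvS arr) := by
      rw [PySem.List.pyGetD_neg_one _ _ hne, List.getLast_eq_getElem]
      simp only [List.length_map, List.length_range, List.getElem_map, List.getElem_range]
      have : pvS arr (ys.length + 1 - 1) + count_set_bits z = pvS arr (ys.length + 1) := by
        simpa [hz] using (pvS_succ arr ys.length hlen).symm
      rw [this]
      simp [List.range_succ]
    rw [List.map_cons, List.foldl_cons, hstep, ih (ys ++ [z]) (by simp [← h])]

lemma psB_eq (arr : List Int) :
    ((arr.map count_set_bits).foldl
      (fun p b => p ++ [PySem.List.pyGetD p (-1) 0 + b]) [0]) = pvP arr := by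
  have := psB_aux arr arr [] rfl
  simpa [pvS] using this

lemma psA_aux (arr : List Int) : ∀ k : Nat, k ≤ arr.length →
    (PySem.List.pyRange 1 ((k : Int) + 1) 1).foldl
      (fun ps i => PySem.List.pySetD ps i
          (PySem.List.pyGetD ps (i - 1) 0 + count_set_bits (PySem.List.pyGetD arr (i - 1) 0)))
      (List.replicate (arr.length + 1) 0)
    = (List.range (arr.length + 1)).map (fun j => if j ≤ k then pvS arr j else 0) := by
  intro k
  induction k with
  | zero =>
    intro _
    rw [PySem.List.pyRange_one_eq_nil (by norm_num)]
    simp only [List.foldl_nil]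
    apply List.ext_getElem (by simp)
    intro i h1 h2
    simp only [List.getElem_replicate, List.getElem_map, List.getElem_range]
    have : i ≤ 0 ↔ i = 0 := by omega
    split
    · next hle => simp only [Nat.le_zero] at hle; subst hle; rfl
    · rfl
  | succ k ih =>
    intro hk
    have hk' : k ≤ arr.length := by omega
    have hcast : ((k + 1 : Nat) : Int) + 1 = ((k : Int) + 1) + 1 := by push_cast; ring
    rw [hcast, PySem.List.pyRange_one_succ_right (by omega), List.foldl_append, ih hk',
      List.foldl_cons, List.foldl_nil]
    have e1 : (k : Int) + 1 - 1 = ((k : Nat) : Int) := by ring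
    rw [e1]
    rw [PySem.List.pyGetD_eq_getElem _ 0 (by positivity) (by simp; omega)]
    rw [PySem.List.pyGetD_eq_getElem arr 0 (by positivity) (by exact_mod_cast hk)]
    have e2 : (k : Int) + 1 = ((k + 1 : Nat) : Int) := by push_cast; ring
    rw [e2, PySem.List.pySetD_natCast]
    simp only [Int.toNat_natCast, List.getElem_map, List.getElem_range, le_refl, if_true,
      List.getElem_range] 
    apply List.ext_getElem (by simp)
    intro j h1 h2
    simp only [List.length_map, List.length_range] at h1 h2 ⊢
    rw [List.getElem_set]
    simp only [List.getElem_map, List.getElem_range]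
    by_cases hj : k + 1 = j
    · subst hj
      simp only [if_pos (le_refl _)]
      exact (pvS_succ arr k (by omega)).symm
    · rw [if_neg hj]
      by_cases hj2 : j ≤ k
      · rw [if_pos hj2, if_pos (by omega)]
      · rw [if_neg hj2, if_neg (by omega)]

lemma psA_eq (arr : List Int) :
    (PySem.List.pyRange 1 ((arr.length : Int) + 1) 1).foldl
      (fun ps i => PySem.List.pySetD ps i
          (PySem.List.pyGetD ps (i - 1) 0 + count_set_bits (PySem.List.pyGetD arr (i - 1) 0)))
      (PySem.List.pyRepeat [0] ((arr.length : Int) + 1))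
    = pvP arr := by
  rw [PySem.List.pyRepeat_singleton]
  have : ((arr.length : Int) + 1).toNat = arr.length + 1 := by omega
  rw [this, psA_aux arr arr.length (le_refl _)]
  apply List.map_congr_left
  intro j hj
  simp only [List.mem_range] at hj
  rw [if_pos (by omega)]

lemma dictA (f : Int → Int) (m : Nat) : ∀ v : Int,
    (((PySem.List.pyRange 0 (m : Int) 1).foldl
        (fun d i => if d.contains (f i) = false then d.insert (f i) [i]
                    else d.modify (f i) [] (· ++ [i])) PySem.Dict.empty).getD v []
      = (PySem.List.pyRange 0 (m : Int) 1).filter (fun j => f j == v))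
    ∧ (((PySem.List.pyRange 0 (m : Int) 1).foldl
        (fun d i => if d.contains (f i) = false then d.insert (f i) [i]
                    else d.modify (f i) [] (· ++ [i])) PySem.Dict.empty).contains v
      = !((PySem.List.pyRange 0 (m : Int) 1).filter (fun j => f j == v)).isEmpty) := by
  induction m with
  | zero =>
    intro v
    rw [PySem.List.pyRange_one_eq_nil (by norm_num)]
    simp [PySem.Dict.getD_empty, PySem.Dict.contains_empty]
  | succ m ih =>
    intro v
    have hcast : ((m + 1 : Nat) : Int) = (m : Int) + 1 := by push_cast; ring
    rw [hcast, PySem.List.pyRange_one_succ_right (by positivity), List.foldl_append,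
      List.foldl_cons, List.foldl_nil, List.filter_append]
    set d := (PySem.List.pyRange 0 (m : Int) 1).foldl
        (fun d i => if d.contains (f i) = false then d.insert (f i) [i]
                    else d.modify (f i) [] (· ++ [i])) PySem.Dict.empty with hd
    by_cases hc : d.contains (f (m : Int)) = false
    · rw [if_pos hc]
      have hemp : (PySem.List.pyRange 0 (m : Int) 1).filter (fun j => f j == f (m : Int)) = [] := by
        have := (ih (f (m : Int))).2
        rw [hc] at this
        cases hl : ((PySem.List.pyRange 0 (m : Int) 1).filter (fun j => f j == f (m : Int))).isEmpty
        · rw [hl] at this; simp at this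
        · exact List.isEmpty_iff.mp hl
      constructor
      · rw [PySem.Dict.getD_insert]
        by_cases hv : v = f (m : Int)
        · subst hv
          rw [if_pos rfl, hemp]
          simp
        · rw [if_neg hv, (ih v).1]
          have : (f (m : Int) == v) = false := by simp; exact fun h => hv h.symm
          simp [this]
      · rw [PySem.Dict.contains_insert]
        by_cases hv : v = f (m : Int)
        · subst hv
          simp
        · have : (f (m : Int) == v) = false := by simp; exact fun h => hv h.symm
          simp [this, hv, (ih v).2]
    · rw [if_neg hc]
      have hcontains : d.contains (f (m : Int)) = true := by simpa using hc
      constructor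
      · rw [PySem.Dict.getD_modify]
        by_cases hv : v = f (m : Int)
        · subst hv
          rw [if_pos rfl, (ih (f (m : Int))).1]
          simp
        · rw [if_neg hv, (ih v).1]
          have : (f (m : Int) == v) = false := by simp; exact fun h => hv h.symm
          simp [this]
      · rw [PySem.Dict.contains_modify]
        by_cases hv : v = f (m : Int)
        · subst hv
          simp
        · have : (f (m : Int) == v) = false := by simp; exact fun h => hv h.symm
          simp [this, hv, (ih v).2]

lemma loopA (f : Int → Int) (X : Int) (m : Nat) :
    ((PySem.List.pyRange 0 (m : Int) 1).foldl
      (fun (st : PySem.Dict Int (List Int) × List (Int × Int)) i =>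
        let prefix_sum := f i
        let ranges := if st.1.contains (prefix_sum - X)
          then st.2 ++ (st.1.getD (prefix_sum - X) []).map (fun start => (start, i - 1))
          else st.2
        let d := if st.1.contains prefix_sum = false
          then st.1.insert prefix_sum [i]
          else st.1.modify prefix_sum [] (· ++ [i])
        (d, ranges))
      (PySem.Dict.empty, []))
    = ((PySem.List.pyRange 0 (m : Int) 1).foldl
        (fun d i => if d.contains (f i) = false then d.insert (f i) [i]
                    else d.modify (f i) [] (· ++ [i])) PySem.Dict.empty,
       (PySem.List.pyRange 0 (m : Int) 1).flatMap (fun i =>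
         ((PySem.List.pyRange 0 i 1).filter (fun j => f j == f i - X)).map
           (fun j => (j, i - 1)))) := by
  induction m with
  | zero =>
    rw [PySem.List.pyRange_one_eq_nil (by norm_num)]
    simp
  | succ m ih =>
    have hcast : ((m + 1 : Nat) : Int) = (m : Int) + 1 := by push_cast; ring
    rw [hcast, PySem.List.pyRange_one_succ_right (by positivity)]
    simp only [List.foldl_append, List.foldl_cons, List.foldl_nil, List.flatMap_append,
      List.flatMap_cons, List.flatMap_nil, List.append_nil, ih]
    refine Prod.ext rfl ?_
    simp only
    rw [(dictA f m (f (m : Int) - X)).2, (dictA f m (f (m : Int) - X)).1]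
    cases hl : ((PySem.List.pyRange 0 (m : Int) 1).filter (fun j => f j == f (m : Int) - X)).isEmpty
    · simp
    · rw [List.isEmpty_iff.mp hl]
      simp

-- the two ports agree (unconditionally, in fact)
lemma pvAB_eq (arr : List Int) (X : Int) :
    find_ranges_with_set_bit_sum arr X = find_ranges_with_set_bit_sum_alt arr X := by
  unfold find_ranges_with_set_bit_sum find_ranges_with_set_bit_sum_alt
  simp only [PySem.List.len_eq, psA_eq, psB_eq]
  have hcast : (arr.length : Int) + 1 = ((arr.length + 1 : Nat) : Int) := by push_cast; ring
  rw [hcast, loopA (fun i => PySem.List.pyGetD (pvP arr) i 0) X (arr.length + 1)]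
  simp only
  -- both sides are flatMaps over ranges; reindex A's over [0, n+1) as 0 :: (1+·) of [0, n)
  rw [PySem.List.pyRange_one 0 ((arr.length + 1 : Nat) : Int), PySem.List.pyRange_one 0 (arr.length : Int)]
  simp only [sub_zero, Int.toNat_natCast, zero_add]
  rw [List.range_succ_eq_map, List.map_cons, List.flatMap_cons]
  rw [Nat.cast_zero, PySem.List.pyRange_one_eq_nil (le_refl (0 : Int))]
  simp only [List.filter_nil, List.map_nil, List.nil_append]
  rw [List.map_map, List.flatMap_map, List.flatMap_map]
  rw [List.flatMap_def, List.flatMap_def]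
  congr 1
  apply List.map_congr_left
  intro k hk
  simp only [Function.comp_apply, Nat.succ_eq_add_one]
  have hc : ((k + 1 : Nat) : Int) = (k : Int) + 1 := by push_cast; ring
  rw [hc]
  have e1 : (fun j : Int => (j, (k : Int) + 1 - 1)) = (fun j : Int => (j, (k : Int))) := by
    funext j; norm_num
  rw [e1]
  congr 1
  apply List.filter_congr
  intro j hj
  rw [Bool.eq_iff_iff]
  simp only [beq_iff_eq]
  omega

-- ===== VERDICT (by name: the statement is the Claim_ definition above) =====
theorem find_ranges_with_set_bit_sum_spec : Claim_equal_find_ranges_with_set_bit_sum := by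
  intro arr X _
  unfold Spec_find_ranges_with_set_bit_sum
  exact pvAB_eq arr X
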